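-- pv_equiv track=rewrite | github.com/Yuvrender-Gill/Reddit-Sentiment-Analyzer | a1_extractFeatures.py | third_person_pronouns
-- ===== SOURCE A (Python) =====
-- def third_person_pronouns(token_list):
--     """
--     Returns the number of third person words used in the given comment.
--     :param token_list
--     :return:
--     """
--
--     third_person_words = ['he', 'him', 'his', 'she', 'her', 'hers', 'it', 'its', 'they', 'them', 'their', 'theirs']
--     count = 0
--     for item in token_list:
--         # Check all the cases 1. lower 2. title 3.Upper
--         if ((item.title() in third_person_words) or
--                 (item.lower() in third_person_words) or
--                 (item in third_person_words) or
--                 (item.upper() in third_person_words)):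
--             count += 1
--     return count
-- ===== SOURCE B (Python) =====
-- def third_person_pronouns(token_list):
--     # Build a frequency table of lowercased tokens, then sum the counts of the
--     # fixed pronoun vocabulary.
--     freq = {}
--     for tok in token_list:
--         w = tok.lower()
--         freq[w] = freq.get(w, 0) + 1
--     return sum(freq.get(w, 0) for w in
--                ('he', 'him', 'his', 'she', 'her', 'hers', 'it', 'its',
--                 'they', 'them', 'their', 'theirs'))
-- ===== Notes on version B (the rewrite author's own statement) =====
-- stated objective: faster
-- what changed: B builds a frequency table of the lowercased tokens in one pass and then sums the table entries over the fixed 12-word pronoun vocabulary, instead of A's per-token four-way case-variant (title/lower/bare/upper) membership test against the word list.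
import Mathlib
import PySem

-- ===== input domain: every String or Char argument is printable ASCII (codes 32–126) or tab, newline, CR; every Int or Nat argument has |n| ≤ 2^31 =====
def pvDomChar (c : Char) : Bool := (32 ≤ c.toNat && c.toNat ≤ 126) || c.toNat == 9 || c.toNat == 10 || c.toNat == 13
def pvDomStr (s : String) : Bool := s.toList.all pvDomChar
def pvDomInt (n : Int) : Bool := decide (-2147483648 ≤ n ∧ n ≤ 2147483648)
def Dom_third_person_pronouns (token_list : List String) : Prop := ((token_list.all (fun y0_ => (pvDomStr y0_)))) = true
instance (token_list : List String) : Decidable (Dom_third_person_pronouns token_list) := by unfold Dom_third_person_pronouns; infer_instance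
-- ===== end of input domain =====

-- B counts by building a frequency table of the lowercased tokens once and summing the
-- table over the fixed pronoun vocabulary, instead of A's per-token case-variant membership tests.

-- ===== PORT A =====
def tpWords : List String :=
  ["he", "him", "his", "she", "her", "hers", "it", "its", "they", "them", "their", "theirs"]

-- hand port of Python str.title(); exact on the ASCII domain: a letter is uppercased iff the
-- previous character is not a letter, letters following a letter are lowercased
def pyTitleChars : List Char → Bool → List Char
  | [], _ => []
  | c :: rest, prevAlpha =>
    (if PySem.Chars.isalpha c then
       (if prevAlpha then PySem.Chars.lowerChar c else PySem.Chars.upperChar c)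
     else c) :: pyTitleChars rest (PySem.Chars.isalpha c)

def pyTitle (s : String) : String := String.ofList (pyTitleChars s.toList false)

def third_person_pronouns (token_list : List String) : Int :=
  token_list.foldl
    (fun count item =>
      if (tpWords.contains (pyTitle item) ||
          tpWords.contains (PySem.Str.lower item) ||
          tpWords.contains item ||
          tpWords.contains (PySem.Str.upper item)) then count + 1 else count)
    0

-- ===== PORT B =====
-- (B uses the same 12-word vocabulary literal tpWords)
def third_person_pronouns_alt (token_list : List String) : Int :=
  let freq : PySem.Dict String Int :=
    token_list.foldl
      (fun d tok =>
        let w := PySem.Str.lower tok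
        d.insert w (d.getD w 0 + 1))
      PySem.Dict.empty
  tpWords.foldl (fun acc w => acc + freq.getD w 0) 0

-- ===== PRECONDITION & SPEC =====
def Spec_third_person_pronouns (token_list : List String) (out : Int) : Prop := out = third_person_pronouns_alt token_list
instance (token_list : List String) (out : Int) : Decidable (Spec_third_person_pronouns token_list out) := by unfold Spec_third_person_pronouns; infer_instance

-- ===== CLAIM (what is proved, stated in full; the proofs are below) =====
def Claim_equal_third_person_pronouns : Prop := ∀ (token_list : List String), Dom_third_person_pronouns token_list → Spec_third_person_pronouns token_list (third_person_pronouns token_list)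

-- ===== LEMMAS AND PROOFS =====

theorem islower_upperChar (c : Char) : PySem.Chars.islower (PySem.Chars.upperChar c) = false := by
  simp only [PySem.Chars.upperChar]
  by_cases h : PySem.Chars.islower c = true
  · simp only [h, if_true]
    have hrange : 97 ≤ c.toNat ∧ c.toNat ≤ 122 := by
      simp only [PySem.Chars.islower, Bool.and_eq_true, decide_eq_true_eq, Char.le_def] at h
      exact ⟨UInt32.le_iff_toNat_le.mp h.1, UInt32.le_iff_toNat_le.mp h.2⟩
    have hvalid : (c.toNat - 32).isValidChar := Or.inl (by omega)
    have hv : (Char.ofNat (c.toNat - 32)).toNat = c.toNat - 32 := by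
      simp [Char.toNat_ofNat, hvalid]
    rw [Bool.eq_false_iff]
    intro hX
    simp only [PySem.Chars.islower, Bool.and_eq_true, decide_eq_true_eq, Char.le_def] at hX
    have h1 := UInt32.le_iff_toNat_le.mp hX.1
    have h1' : 97 ≤ (Char.ofNat (c.toNat - 32)).toNat := h1
    omega
  · simp only [Bool.not_eq_true] at h
    simp [h]

theorem title_not_mem (s : String) : tpWords.contains (pyTitle s) = false := by
  by_contra hc
  have hmem : pyTitle s ∈ tpWords := by
    have := Bool.of_not_eq_false hc
    simpa [List.contains_iff_exists_mem_beq] using this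
  have hlow : PySem.Chars.islower ((pyTitle s).toList.headD 'A') = true := by
    simp only [tpWords, List.mem_cons, List.not_mem_nil, or_false] at hmem
    rcases hmem with h|h|h|h|h|h|h|h|h|h|h|h <;> rw [h] <;> decide
  have hself : (pyTitle s).toList = pyTitleChars s.toList false := by
    simp [pyTitle]
  rw [hself] at hlow
  generalize s.toList = L at hlow
  cases L with
  | nil => revert hlow; decide
  | cons c rest =>
      simp only [pyTitleChars, List.headD_cons] at hlow
      by_cases ha : PySem.Chars.isalpha c = true
      · rw [if_pos ha, if_neg (by simp)] at hlow
        rw [islower_upperChar] at hlow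
        exact Bool.false_ne_true hlow
      · rw [if_neg ha] at hlow
        simp only [PySem.Chars.isalpha, Bool.or_eq_true] at ha
        rw [not_or] at ha
        exact absurd hlow (by simpa using ha.2)

theorem upper_not_mem (s : String) : tpWords.contains (PySem.Str.upper s) = false := by
  by_contra hc
  have hmem : PySem.Str.upper s ∈ tpWords := by
    have := Bool.of_not_eq_false hc
    simpa [List.contains_iff_exists_mem_beq] using this
  have hlow : PySem.Chars.islower ((PySem.Str.upper s).toList.headD 'A') = true := by
    simp only [tpWords, List.mem_cons, List.not_mem_nil, or_false] at hmem
    rcases hmem with h|h|h|h|h|h|h|h|h|h|h|h <;> rw [h] <;> decide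
  have hul : (PySem.Str.upper s).toList = (s.toList).map PySem.Chars.upperChar := by
    simp [PySem.Str.toList_upper, PySem.Chars.upper]
  rw [hul] at hlow
  generalize s.toList = L at hlow
  cases L with
  | nil => revert hlow; decide
  | cons c rest =>
      simp only [List.map_cons, List.headD_cons] at hlow
      rw [islower_upperChar] at hlow
      exact Bool.false_ne_true hlow

theorem mem_imp_lower (s : String) (h : tpWords.contains s = true) :
    tpWords.contains (PySem.Str.lower s) = true := by
  have hmem : s ∈ tpWords := by
    simpa [List.contains_iff_exists_mem_beq] using h
  simp only [tpWords, List.mem_cons, List.not_mem_nil, or_false] at hmem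
  rcases hmem with h|h|h|h|h|h|h|h|h|h|h|h <;> rw [h] <;> decide

theorem cond_eq (item : String) :
    (tpWords.contains (pyTitle item) ||
     tpWords.contains (PySem.Str.lower item) ||
     tpWords.contains item ||
     tpWords.contains (PySem.Str.upper item)) = tpWords.contains (PySem.Str.lower item) := by
  rw [title_not_mem, upper_not_mem]
  by_cases h : tpWords.contains item = true
  · rw [h, mem_imp_lower item h]; rfl
  · rw [Bool.not_eq_true] at h
    rw [h]
    simp

theorem foldl_count (l : List String) (p : String → Bool) (a : Int) :
    l.foldl (fun count item => if p item then count + 1 else count) a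
      = a + (l.countP p : Int) := by
  induction l generalizing a with
  | nil => simp
  | cons x xs ih =>
      simp only [List.foldl_cons, List.countP_cons, ih]
      by_cases h : p x = true
      · simp only [h, if_true]
        push_cast
        ring
      · simp only [h, Bool.false_eq_true, if_false]
        simp [h]

theorem sum_indicator (ws : List String) (x : String) :
    (ws.map (fun w => if w = x then (1 : Nat) else 0)).sum = ws.count x := by
  induction ws with
  | nil => simp
  | cons w ws ih =>
      simp only [List.map_cons, List.sum_cons, List.count_cons, ih]
      by_cases h : w = x
      · subst h; simp [Nat.add_comm]
      · have hb : (x == w) = false := by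
          simp [beq_iff_eq]
          exact fun he => h he.symm
        simp [h, hb]

theorem sum_counts_eq_countP (ws : List String) (hnd : ws.Nodup) (M : List String) :
    (ws.map (fun w => M.count w)).sum = M.countP (fun x => ws.contains x) := by
  induction M with
  | nil => simp
  | cons x M ih =>
      simp only [List.countP_cons]
      have hsplit : (ws.map (fun w => (x :: M).count w)).sum
          = (ws.map (fun w => M.count w)).sum
            + (ws.map (fun w => if w = x then (1 : Nat) else 0)).sum := by
        rw [← List.sum_map_add]
        apply congrArg
        apply List.map_congr_left
        intro w _
        by_cases h : w = x
        · subst h; simp [List.count_cons]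
        · have h' : ¬x = w := fun he => h he.symm
          simp [List.count_cons, h, h']
      rw [hsplit, ih, sum_indicator]
      by_cases hx : x ∈ ws
      · have h1 : ws.count x = 1 := List.count_eq_one_of_mem hnd hx
        have hcx : ws.contains x = true := by simpa [List.contains_iff_exists_mem_beq] using hx
        simp [h1, hx, hcx]
      · have h0 : ws.count x = 0 := List.count_eq_zero.mpr hx
        have hcx : ws.contains x = false := by
          rw [Bool.eq_false_iff]
          intro hcc
          exact hx (by simpa [List.contains_iff_exists_mem_beq] using hcc)
        simp [h0, hx, hcx]

theorem foldl_add_getD (ws : List String) (f : String → Int) (a : Int) :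
    ws.foldl (fun acc w => acc + f w) a = a + (ws.map f).sum := by
  induction ws generalizing a with
  | nil => simp
  | cons w ws ih => simp only [List.foldl_cons, List.map_cons, List.sum_cons, ih]; ring

theorem main_eq (token_list : List String) :
    third_person_pronouns token_list = third_person_pronouns_alt token_list := by
  unfold third_person_pronouns third_person_pronouns_alt
  dsimp only
  have hAcongr := PySem.List.foldl_congr_mem (l := token_list) (init := (0 : Int))
    (f := fun count item =>
      if (tpWords.contains (pyTitle item) ||
          tpWords.contains (PySem.Str.lower item) ||
          tpWords.contains item ||
          tpWords.contains (PySem.Str.upper item)) then count + 1 else count)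
    (g := fun count item =>
      if tpWords.contains (PySem.Str.lower item) then count + 1 else count)
    (fun acc item _ => by simp only [cond_eq])
  rw [hAcongr, foldl_count, foldl_add_getD]
  simp only [zero_add]
  have hfreq : ∀ w : String,
      (token_list.foldl
        (fun d tok => d.insert (PySem.Str.lower tok) (d.getD (PySem.Str.lower tok) 0 + 1))
        PySem.Dict.empty).getD w 0
      = ((token_list.map PySem.Str.lower).count w : Int) := by
    intro w
    rw [← List.foldl_map (f := PySem.Str.lower)
      (g := fun d w => PySem.Dict.insert d w (PySem.Dict.getD d w 0 + 1))]
    rw [PySem.Dict.getD_foldl_insert_add_one]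
    simp
  calc ((token_list.countP (fun item => tpWords.contains (PySem.Str.lower item)) : Nat) : Int)
      = (((token_list.map PySem.Str.lower).countP (fun w => tpWords.contains w) : Nat) : Int) := by
        rw [List.countP_map]; rfl
    _ = (((tpWords.map (fun w => (token_list.map PySem.Str.lower).count w)).sum : Nat) : Int) := by
        rw [sum_counts_eq_countP tpWords (by decide) (token_list.map PySem.Str.lower)]
    _ = _ := by
        rw [Nat.cast_list_sum, List.map_map]
        apply congrArg
        apply List.map_congr_left
        intro w _
        simp only [Function.comp]
        rw [hfreq w]

-- ===== VERDICT (by name: the statement is the Claim_ definition above) =====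
theorem third_person_pronouns_spec : Claim_equal_third_person_pronouns := by
  intro token_list _
  unfold Spec_third_person_pronouns
  exact main_eq token_list
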